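-- pv_equiv track=rewrite | github.com/iamdiegosanches/trabalhoIA | Labirinto/main.py | heuristica_manhattan_simples
-- ===== SOURCE A (Python) =====
-- def heuristica_manhattan_simples(cost_matrix, end):
--     rows, cols = len(cost_matrix), len(cost_matrix[0])
--     heuristic = [[0 for _ in range(cols)] for _ in range(rows)]
--
--     ey, ex = end  # Coordenadas do destino
--
--     for y in range(rows):
--         for x in range(cols):
--             heuristic[y][x] = abs(ey - y) + abs(ex - x)  # Distância de Manhattan
--
--     return heuristic
-- ===== SOURCE B (Python) =====
-- def heuristica_manhattan_simples(cost_matrix, end):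
--     rows, cols = len(cost_matrix), len(cost_matrix[0])
--     ey, ex = end
--     # Incremental dynamic programming: abs is evaluated once, for the corner cell.
--     # First row: running value v = |ey-0| + |ex-x|, updated by +-1 per column.
--     row = []
--     v = abs(ey) + abs(ex)
--     for x in range(cols):
--         row.append(v)
--         v += 1 if x >= ex else -1
--     # Each later row is the previous row shifted by +-1 (distance grows away from ey).
--     out = []
--     for y in range(rows):
--         out.append(row)
--         row = [w + (1 if y >= ey else -1) for w in row]
--     return out
-- ===== Notes on version B (the rewrite author's own statement) =====
-- stated objective: faster
-- what changed: B replaces A's per-cell evaluation of the Manhattan formula over a preallocated zero matrix with incremental dynamic programming: abs is computed once for the corner cell, the first row is built by a running +-1 delta, and every later row is derived from the previous row by an elementwise +-1 shift.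
import Mathlib
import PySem

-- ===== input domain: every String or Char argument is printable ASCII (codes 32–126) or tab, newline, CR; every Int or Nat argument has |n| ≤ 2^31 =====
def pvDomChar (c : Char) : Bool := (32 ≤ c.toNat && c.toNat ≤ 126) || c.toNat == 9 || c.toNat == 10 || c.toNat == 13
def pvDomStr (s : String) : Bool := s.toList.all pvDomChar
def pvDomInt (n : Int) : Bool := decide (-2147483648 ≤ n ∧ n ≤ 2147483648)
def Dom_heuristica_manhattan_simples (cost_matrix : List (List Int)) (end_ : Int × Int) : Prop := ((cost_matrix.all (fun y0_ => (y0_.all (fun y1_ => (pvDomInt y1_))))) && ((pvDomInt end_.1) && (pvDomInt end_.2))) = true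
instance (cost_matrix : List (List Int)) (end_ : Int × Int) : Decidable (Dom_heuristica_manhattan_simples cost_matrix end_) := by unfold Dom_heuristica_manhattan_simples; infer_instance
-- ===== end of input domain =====

-- B replaces A's per-cell Manhattan formula with incremental dynamic programming:
-- abs is evaluated once for the corner cell, the first row is built by a running ±1
-- delta and each later row is the previous row shifted by ±1 (alternative decomposition).

-- ===== PORT A =====
-- cost_matrix[0] raises IndexError on [], excluded by Pre_; pyGet?+getD [] is exact on Pre_.
def heuristica_manhattan_simples (cost_matrix : List (List Int)) (end_ : Int × Int) : List (List Int) :=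
  let rows : Int := cost_matrix.length
  let cols : Int := ((PySem.List.pyGet? cost_matrix 0).getD []).length
  let heuristic : List (List Int) :=
    (PySem.List.pyRange 0 rows 1).map (fun _ => (PySem.List.pyRange 0 cols 1).map (fun _ => (0 : Int)))
  let ey := end_.1
  let ex := end_.2
  (PySem.List.pyRange 0 rows 1).foldl (fun h y =>
    (PySem.List.pyRange 0 cols 1).foldl (fun h x =>
      h.set y.toNat ((h.getD y.toNat []).set x.toNat (|ey - y| + |ex - x|))) h) heuristic

-- ===== PORT B =====
def heuristica_manhattan_simples_alt (cost_matrix : List (List Int)) (end_ : Int × Int) : List (List Int) :=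
  let rows : Int := cost_matrix.length
  let cols : Int := ((PySem.List.pyGet? cost_matrix 0).getD []).length
  let ey := end_.1
  let ex := end_.2
  -- first row: running value v, appended then bumped by ±1
  let fr := (PySem.List.pyRange 0 cols 1).foldl
      (fun (s : List Int × Int) x => (s.1 ++ [s.2], s.2 + (if x ≥ ex then 1 else -1)))
      ([], |ey| + |ex|)
  -- each later row derived from the previous by an elementwise ±1 shift
  let res := (PySem.List.pyRange 0 rows 1).foldl
      (fun (s : List (List Int) × List Int) y =>
        (s.1 ++ [s.2], s.2.map (fun w => w + (if y ≥ ey then 1 else -1))))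
      (([] : List (List Int)), fr.1)
  res.1

-- ===== PRECONDITION & SPEC =====
-- A evaluates cost_matrix[0], which raises IndexError on the empty matrix; nothing else raises.
def Pre_heuristica_manhattan_simples (cost_matrix : List (List Int)) (end_ : Int × Int) : Prop :=
  cost_matrix ≠ []
instance (cost_matrix : List (List Int)) (end_ : Int × Int) : Decidable (Pre_heuristica_manhattan_simples cost_matrix end_) := by unfold Pre_heuristica_manhattan_simples; infer_instance

def pvWitness_heuristica_manhattan_simples : List (List Int) × (Int × Int) := ([[1, 2], [3, 4]], (1, 0))

def Spec_heuristica_manhattan_simples (cost_matrix : List (List Int)) (end_ : Int × Int) (out : List (List Int)) : Prop := out = heuristica_manhattan_simples_alt cost_matrix end_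
instance (cost_matrix : List (List Int)) (end_ : Int × Int) (out : List (List Int)) : Decidable (Spec_heuristica_manhattan_simples cost_matrix end_ out) := by unfold Spec_heuristica_manhattan_simples; infer_instance

-- ===== CLAIM (what is proved, stated in full; the proofs are below) =====
def Claim_equal_heuristica_manhattan_simples : Prop := ∀ (cost_matrix : List (List Int)) (end_ : Int × Int), Dom_heuristica_manhattan_simples cost_matrix end_ → Pre_heuristica_manhattan_simples cost_matrix end_ → Spec_heuristica_manhattan_simples cost_matrix end_ (heuristica_manhattan_simples cost_matrix end_)

-- ===== LEMMAS AND PROOFS =====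

-- canonical form both ports are reduced to
def pvRow (ey ex : Int) (cols : Nat) (y : Int) : List Int :=
  (PySem.List.pyRange 0 (cols : Int) 1).map (fun x => |ey - y| + |ex - x|)

-- the incremental delta really steps the absolute difference
theorem pv_abs_step (e : Int) (k : Nat) :
    |e - (k : Int)| + (if (k : Int) ≥ e then 1 else -1) = |e - ((k : Int) + 1)| := by
  split_ifs with h
  · rw [abs_of_nonpos (by omega), abs_of_nonpos (by omega)]; ring
  · rw [abs_of_nonneg (by omega), abs_of_nonneg (by omega)]; ring

-- ===== A-side lemmas (A's destructive nested loops tabulate the canonical matrix) =====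

-- A's inner loop only rewrites row k of the matrix: it factors through a fold on that row.
theorem pv_foldl_set_row (k : Nat) (ey ex yv : Int) :
    ∀ (xs : List Int) (h : List (List Int)), k < h.length →
      xs.foldl (fun h x => h.set k ((h.getD k []).set x.toNat (|ey - yv| + |ex - x|))) h
        = h.set k (xs.foldl (fun row x => row.set x.toNat (|ey - yv| + |ex - x|)) (h.getD k [])) := by
  intro xs
  induction xs with
  | nil =>
      intro h hk
      rw [List.foldl_nil, List.foldl_nil, List.getD_eq_getElem _ _ hk, List.set_getElem_self]
  | cons x xs ih =>
      intro h hk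
      simp only [List.foldl_cons]
      rw [ih _ (by simpa using hk)]
      have hgd : (h.set k ((h.getD k []).set x.toNat (|ey - yv| + |ex - x|))).getD k []
          = (h.getD k []).set x.toNat (|ey - yv| + |ex - x|) := by
        rw [List.getD_eq_getElem _ _ (by simpa using hk), List.getElem_set_self]
      rw [hgd, List.set_set]

-- Folding `set x (f x)` over range(0, n) tabulates the first n entries of the row.
theorem pv_foldl_set_tabulate (ey ex yv : Int) :
    ∀ (n : Nat) (h : List Int), n ≤ h.length →
      (PySem.List.pyRange 0 (n : Int) 1).foldl (fun row x => row.set x.toNat (|ey - yv| + |ex - x|)) h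
        = (PySem.List.pyRange 0 (n : Int) 1).map (fun x => |ey - yv| + |ex - x|) ++ h.drop n := by
  intro n
  induction n with
  | zero =>
      intro h _
      simp [PySem.List.pyRange_one_eq_nil]
  | succ n ih =>
      intro h hn
      have hcast : ((n + 1 : Nat) : Int) = (n : Int) + 1 := by push_cast; ring
      rw [hcast, PySem.List.pyRange_one_succ_right (by positivity)]
      rw [List.foldl_append, List.map_append]
      rw [ih h (Nat.le_of_succ_le hn)]
      have hlen : ((PySem.List.pyRange 0 (n : Int) 1).map (fun x => |ey - yv| + |ex - x|)).length = n := by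
        simp [PySem.List.length_pyRange_one]
      have hnlt : n < h.length := hn
      simp only [List.foldl_cons, List.foldl_nil, Int.toNat_natCast, List.map_cons, List.map_nil]
      rw [List.set_append_right _ _ (by omega), hlen, Nat.sub_self]
      rw [List.drop_eq_getElem_cons hnlt, List.set_cons_zero, List.append_assoc]
      rfl

-- One outer iteration at row index n (of length cols) produces exactly the canonical row.
theorem pv_outer_fold (ey ex : Int) (cols : Nat) :
    ∀ (n : Nat) (h : List (List Int)), n ≤ h.length → (∀ r ∈ h, r.length = cols) →
      (PySem.List.pyRange 0 (n : Int) 1).foldl (fun h y =>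
          (PySem.List.pyRange 0 (cols : Int) 1).foldl (fun h x =>
            h.set y.toNat ((h.getD y.toNat []).set x.toNat (|ey - y| + |ex - x|))) h) h
        = (PySem.List.pyRange 0 (n : Int) 1).map (pvRow ey ex cols) ++ h.drop n := by
  intro n
  induction n with
  | zero =>
      intro h _ _
      simp [PySem.List.pyRange_one_eq_nil]
  | succ n ih =>
      intro h hn hrows
      have hcast : ((n + 1 : Nat) : Int) = (n : Int) + 1 := by push_cast; ring
      rw [hcast, PySem.List.pyRange_one_succ_right (by positivity)]
      rw [List.foldl_append, List.map_append]
      rw [ih h (Nat.le_of_succ_le hn) hrows]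
      have hnlt : n < h.length := hn
      have hmaplen :
          ((PySem.List.pyRange 0 (n : Int) 1).map (pvRow ey ex cols)).length = n := by
        simp [PySem.List.length_pyRange_one]
      set L := (PySem.List.pyRange 0 (n : Int) 1).map (pvRow ey ex cols) with hL
      have hlen' : (L ++ h.drop n).length = h.length := by
        simp [hmaplen]; omega
      have hklt : (Int.toNat (n : Int)) < (L ++ h.drop n).length := by
        simpa [Int.toNat_natCast, hlen'] using hnlt
      simp only [List.foldl_cons, List.foldl_nil]
      rw [pv_foldl_set_row ((n : Int)).toNat ey ex (n : Int) _ _ hklt]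
      have hget : (L ++ h.drop n).getD (Int.toNat (n : Int)) [] = h[n] := by
        rw [List.getD_eq_getElem _ _ hklt]
        simp only [Int.toNat_natCast]
        rw [List.getElem_append_right (by omega)]
        simp [hmaplen]
      rw [hget]
      have hrowlen : (h[n]).length = cols := hrows _ (List.getElem_mem hnlt)
      rw [pv_foldl_set_tabulate ey ex (n : Int) cols h[n] (le_of_eq hrowlen.symm)]
      rw [← hrowlen, List.drop_length, List.append_nil]
      rw [List.set_append_right _ _ (by simp [hmaplen]), hmaplen]
      simp only [Int.toNat_natCast, Nat.sub_self]
      rw [List.drop_eq_getElem_cons hnlt, List.set_cons_zero, List.append_assoc]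
      simp [pvRow]

-- ===== B-side lemmas (the running deltas tabulate the same canonical matrix) =====

-- The first-row fold carries v = |ey| + |ex - next index| and emits the canonical first row.
theorem pv_first_row_fold (ey ex : Int) :
    ∀ (n : Nat),
      (PySem.List.pyRange 0 (n : Int) 1).foldl
        (fun (s : List Int × Int) x => (s.1 ++ [s.2], s.2 + (if x ≥ ex then 1 else -1)))
        ([], |ey| + |ex|)
      = ((PySem.List.pyRange 0 (n : Int) 1).map (fun x => |ey| + |ex - x|), |ey| + |ex - (n : Int)|) := by
  intro n
  induction n with
  | zero => simp [PySem.List.pyRange_one_eq_nil]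
  | succ n ih =>
      have hcast : ((n + 1 : Nat) : Int) = (n : Int) + 1 := by push_cast; ring
      rw [hcast, PySem.List.pyRange_one_succ_right (by positivity)]
      rw [List.foldl_append, List.map_append, ih]
      simp only [List.foldl_cons, List.foldl_nil, List.map_cons, List.map_nil]
      refine Prod.ext rfl ?_
      show |ey| + |ex - (n : Int)| + (if (n : Int) ≥ ex then 1 else -1) = |ey| + |ex - ((n : Int) + 1)|
      have := pv_abs_step ex n
      omega

-- Shifting a canonical row by the ±1 delta yields the next canonical row.
theorem pv_row_shift (ey ex : Int) (cols : Nat) (n : Nat) :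
    (pvRow ey ex cols (n : Int)).map (fun w => w + (if (n : Int) ≥ ey then 1 else -1))
      = pvRow ey ex cols ((n : Int) + 1) := by
  unfold pvRow
  rw [List.map_map]
  apply List.map_congr_left
  intro x _
  simp only [Function.comp_apply]
  have h1 := pv_abs_step ey n
  have h2 : |ey - (n : Int)| = |(n : Int) - ey| := abs_sub_comm _ _
  have h3 : |ey - ((n : Int) + 1)| = |((n : Int) + 1) - ey| := abs_sub_comm _ _
  split_ifs with h <;> · rw [h2, h3]; omega

-- The outer fold starting from the canonical first row emits the canonical matrix.
theorem pv_alt_outer_fold (ey ex : Int) (cols : Nat) :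
    ∀ (n : Nat),
      (PySem.List.pyRange 0 (n : Int) 1).foldl
        (fun (s : List (List Int) × List Int) y =>
          (s.1 ++ [s.2], s.2.map (fun w => w + (if y ≥ ey then 1 else -1))))
        (([] : List (List Int)), pvRow ey ex cols 0)
      = ((PySem.List.pyRange 0 (n : Int) 1).map (pvRow ey ex cols), pvRow ey ex cols (n : Int)) := by
  intro n
  induction n with
  | zero => simp [PySem.List.pyRange_one_eq_nil]
  | succ n ih =>
      have hcast : ((n + 1 : Nat) : Int) = (n : Int) + 1 := by push_cast; ring
      rw [hcast, PySem.List.pyRange_one_succ_right (by positivity)]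
      rw [List.foldl_append, List.map_append, ih]
      simp only [List.foldl_cons, List.foldl_nil, List.map_cons, List.map_nil]
      exact Prod.ext rfl (pv_row_shift ey ex cols n)

-- B equals the canonical matrix.
theorem pv_alt_canonical (cm : List (List Int)) (end_ : Int × Int) :
    heuristica_manhattan_simples_alt cm end_
      = (PySem.List.pyRange 0 (cm.length : Int) 1).map
          (pvRow end_.1 end_.2 ((PySem.List.pyGet? cm 0).getD []).length) := by
  unfold heuristica_manhattan_simples_alt
  dsimp only
  set cols : Nat := ((PySem.List.pyGet? cm 0).getD []).length with hcols
  rw [pv_first_row_fold end_.1 end_.2 cols]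
  have hfr : (PySem.List.pyRange 0 (cols : Int) 1).map (fun x => |end_.1| + |end_.2 - x|)
      = pvRow end_.1 end_.2 cols 0 := by
    unfold pvRow
    apply List.map_congr_left
    intro x _
    norm_num
  rw [hfr, pv_alt_outer_fold end_.1 end_.2 cols cm.length]

-- ===== VERDICT (by name: the statement is the Claim_ definition above) =====
theorem heuristica_manhattan_simples_spec : Claim_equal_heuristica_manhattan_simples := by
  intro cm end_ _ _
  unfold Spec_heuristica_manhattan_simples
  rw [pv_alt_canonical]
  unfold heuristica_manhattan_simples
  dsimp only
  set cols : Nat := ((PySem.List.pyGet? cm 0).getD []).length with hcols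
  rw [pv_outer_fold end_.1 end_.2 cols cm.length _ (by simp [PySem.List.length_pyRange_one])
      (by intro r hr; simp only [List.mem_map] at hr; obtain ⟨y, _, rfl⟩ := hr
          simp [PySem.List.length_pyRange_one])]
  have hdrop :
      ((PySem.List.pyRange 0 (cm.length : Int) 1).map
        (fun _ => (PySem.List.pyRange 0 (cols : Int) 1).map (fun _ => (0 : Int)))).drop cm.length = [] := by
    apply List.drop_eq_nil_of_le
    simp [PySem.List.length_pyRange_one]
  rw [hdrop, List.append_nil]
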